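-- pv_equiv track=rewrite | github.com/MrGiovanni/Touchstone | plot/PlotGroup.py | order_models
-- ===== SOURCE A (Python) =====
-- model_ranking=['Average AI Algorithm','STU-Net','nnU-Net U-Net',
--                'nnU-Net ResEncL','MedNeXt','UniSeg','Diff-UNet','LHU-Net','U-Net & CLIP',
--                'NexToU','SegResNet','SwinUNETR & CLIP','SegVol',
--                'UCTransNet','UNEST','SwinUNETR','UNETR','SAM-Adapter','CleanNet']
--
-- def order_models(models):
--     tmp=[]
--     for model in model_ranking:
--         if model in models:
--             tmp.append(model)
--
--     for model in models:
--         if model not in model_ranking: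
--             raise ValueError('Unranked model: ', model, ', please add it to model_ranking list inside this code, in the correct position, according to the overall raking')
--
--     return tmp
-- ===== SOURCE B (Python) =====
-- model_ranking=['Average AI Algorithm','STU-Net','nnU-Net U-Net',
--                'nnU-Net ResEncL','MedNeXt','UniSeg','Diff-UNet','LHU-Net','U-Net & CLIP',
--                'NexToU','SegResNet','SwinUNETR & CLIP','SegVol',
--                'UCTransNet','UNEST','SwinUNETR','UNETR','SAM-Adapter','CleanNet']
--
-- def order_models(models):
--     rank = {m: i for i, m in enumerate(model_ranking)}
--     for model in models:
--         if model not in rank: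
--             raise ValueError('Unranked model: ', model, ', please add it to model_ranking list inside this code, in the correct position, according to the overall raking')
--     return sorted(set(models), key=rank.__getitem__)
-- ===== Notes on version B (the rewrite author's own statement) =====
-- stated objective: faster
-- what changed: B replaces A's scan of the fixed ranking list with linear membership tests per entry by a precomputed rank-index dict: O(1) hash validation of each model and sorted(set(models), key=rank.__getitem__) to produce the same ordered, deduplicated result.
import Mathlib
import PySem

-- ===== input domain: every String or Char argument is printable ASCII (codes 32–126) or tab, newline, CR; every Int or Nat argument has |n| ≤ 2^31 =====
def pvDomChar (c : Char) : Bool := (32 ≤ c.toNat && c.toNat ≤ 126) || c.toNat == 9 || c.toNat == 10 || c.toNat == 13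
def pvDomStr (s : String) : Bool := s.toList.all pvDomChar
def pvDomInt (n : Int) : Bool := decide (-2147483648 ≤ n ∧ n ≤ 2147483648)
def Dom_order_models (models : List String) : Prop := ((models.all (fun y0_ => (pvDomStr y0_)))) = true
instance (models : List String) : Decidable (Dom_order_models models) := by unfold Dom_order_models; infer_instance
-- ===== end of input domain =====

-- B replaces A's per-entry linear membership scans over the fixed ranking by a rank-index
-- dict plus sorted(set(models), key=rank) (objective: faster by a constant factor).
-- A raises ValueError when some model is not in model_ranking; Pre_ excludes exactly those inputs.

-- ===== PORT A =====
def modelRanking : List String :=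
  ["Average AI Algorithm", "STU-Net", "nnU-Net U-Net",
   "nnU-Net ResEncL", "MedNeXt", "UniSeg", "Diff-UNet", "LHU-Net", "U-Net & CLIP",
   "NexToU", "SegResNet", "SwinUNETR & CLIP", "SegVol",
   "UCTransNet", "UNEST", "SwinUNETR", "UNETR", "SAM-Adapter", "CleanNet"]

-- The second Python loop only raises ValueError (no effect on the return value);
-- Pre_order_models excludes exactly the inputs on which it fires.
def order_models (models : List String) : List String :=
  modelRanking.foldl (fun tmp model => if model ∈ models then tmp ++ [model] else tmp) []

-- ===== PORT B =====
-- rank = {m: i for i, m in enumerate(model_ranking)}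
def rankDict : PySem.Dict String Int :=
  (PySem.List.enumerate modelRanking).foldl (fun d p => d.insert p.2 p.1) PySem.Dict.empty

-- rank[m] raises KeyError only outside Pre_ (the validation loop raised first);
-- inside Pre_ every key is present, so getD with a dummy default is exact there.
def order_models_alt (models : List String) : List String :=
  PySem.List.sorted (PySem.Set.ofList models) (fun m => rankDict.getD m (-1)) false

-- ===== PRECONDITION & SPEC =====
-- Pre_ excludes exactly the inputs on which A raises ValueError ('Unranked model').
def Pre_order_models (models : List String) : Prop := ∀ m ∈ models, m ∈ modelRanking
instance (models : List String) : Decidable (Pre_order_models models) := by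
  unfold Pre_order_models; infer_instance
def pvWitness_order_models : List String := ["MedNeXt", "STU-Net", "MedNeXt", "CleanNet"]

def Spec_order_models (models : List String) (out : List String) : Prop := out = order_models_alt models
instance (models : List String) (out : List String) : Decidable (Spec_order_models models out) := by unfold Spec_order_models; infer_instance

-- ===== CLAIM (what is proved, stated in full; the proofs are below) =====
def Claim_equal_order_models : Prop := ∀ (models : List String), Dom_order_models models → Pre_order_models models → Spec_order_models models (order_models models)

-- ===== LEMMAS AND PROOFS =====
theorem modelRanking_nodup : modelRanking.Nodup := by decide

theorem rankKey_pairwise :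
    List.Pairwise (fun a b => rankDict.getD a (-1) < rankDict.getD b (-1)) modelRanking := by
  decide

theorem filter_perm_ofList (models : List String) (hpre : ∀ m ∈ models, m ∈ modelRanking) :
    (modelRanking.filter (fun x => decide (x ∈ models))).Perm (PySem.Set.ofList models) := by
  apply (List.perm_ext_iff_of_nodup (modelRanking_nodup.filter _) (PySem.Set.nodup_ofList models)).mpr
  intro a
  simp only [List.mem_filter, decide_eq_true_eq, PySem.Set.mem_ofList]
  exact ⟨fun h => h.2, fun h => ⟨hpre a h, h⟩⟩

-- ===== VERDICT (by name: the statement is the Claim_ definition above) =====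
theorem order_models_spec : Claim_equal_order_models := by
  intro models _ hpre
  unfold Spec_order_models order_models order_models_alt
  rw [PySem.List.foldl_append_ite_eq_filter (fun m => m ∈ models)]
  rw [List.nil_append]
  exact (PySem.List.sorted_eq_of_perm_of_pairwise_lt _ _ _
    (filter_perm_ofList models hpre)
    (rankKey_pairwise.sublist List.filter_sublist)).symm
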